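-- pv_equiv track=rewrite | github.com/artemlaw/course_work | vk.py | get_max_size
-- ===== SOURCE A (Python) =====
-- def get_max_size(sizes):
--     # вернуть type и url
--     if len(sizes) > 1:
--         sizes_type = ['w', 'z', 'y', 'r', 'q', 'p', 'o', 'x', 'm', 's']
--         for size_type in sizes_type:
--             for size in sizes:
--                 if size['type'] == size_type:
--                     return size
--         return None
--     else:
--         return sizes[0]
-- ===== SOURCE B (Python) =====
-- # Single pass over sizes with a precomputed rank table, instead of A's
-- # priority-by-priority rescans of the whole list.
-- RANK = {'w': 0, 'z': 1, 'y': 2, 'r': 3, 'q': 4, 'p': 5, 'o': 6, 'x': 7, 'm': 8, 's': 9}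
--
--
-- def get_max_size(sizes):
--     # вернуть type и url
--     if len(sizes) > 1:
--         best, best_rank = None, 10
--         for size in sizes:
--             r = RANK.get(size['type'], 10)
--             if r < best_rank:
--                 best, best_rank = size, r
--         return best
--     else:
--         return sizes[0]
-- ===== Notes on version B (the rewrite author's own statement) =====
-- stated objective: simpler
-- what changed: A rescans the whole list once per priority letter (up to 10 passes); B precomputes a rank table and keeps the lowest-ranked element in a single pass, returning None when no element has a ranked type.
-- outside the precondition, e.g. on get_max_size([{'type': 'w'}, {}]): A returns {'type': 'w'}, B raises KeyError
import Mathlib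
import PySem

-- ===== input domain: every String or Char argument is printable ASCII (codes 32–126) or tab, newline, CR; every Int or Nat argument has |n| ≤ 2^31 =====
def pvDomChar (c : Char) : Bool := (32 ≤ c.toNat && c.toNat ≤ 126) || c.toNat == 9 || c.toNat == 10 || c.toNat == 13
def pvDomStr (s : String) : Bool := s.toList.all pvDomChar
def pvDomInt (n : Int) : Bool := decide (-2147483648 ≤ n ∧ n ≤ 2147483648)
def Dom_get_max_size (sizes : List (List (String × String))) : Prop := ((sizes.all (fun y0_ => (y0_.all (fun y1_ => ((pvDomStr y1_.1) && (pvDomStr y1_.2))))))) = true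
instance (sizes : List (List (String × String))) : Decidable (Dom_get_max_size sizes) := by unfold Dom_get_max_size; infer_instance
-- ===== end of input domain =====

-- B is a single pass keeping the lowest-ranked element, vs A's one rescan of the list per
-- priority letter; equivalence is about the return value only (neither mutates its argument).

-- ===== PORT A =====
-- size['type'] raises KeyError when the key is absent; Pre_ excludes such inputs (and the
-- empty list, IndexError via pyGet?), so the total getD with default "" is exact on Pre_.
def get_max_size (sizes : List (List (String × String))) : Option (List (String × String)) :=
  if 1 < sizes.length then
    let sizes_type : List String := ["w", "z", "y", "r", "q", "p", "o", "x", "m", "s"]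
    sizes_type.findSome? (fun size_type =>
      sizes.find? (fun size => PySem.Dict.getD (PySem.Dict.mk size) "type" "" == size_type))
  else
    PySem.List.pyGet? sizes 0

-- ===== PORT B =====
def rank_get_max_size : PySem.Dict String Int :=
  PySem.Dict.mk [("w", 0), ("z", 1), ("y", 2), ("r", 3), ("q", 4),
                 ("p", 5), ("o", 6), ("x", 7), ("m", 8), ("s", 9)]

def get_max_size_alt (sizes : List (List (String × String))) : Option (List (String × String)) :=
  if 1 < sizes.length then
    (sizes.foldl
      (fun acc size =>
        let r := PySem.Dict.getD rank_get_max_size (PySem.Dict.getD (PySem.Dict.mk size) "type" "") 10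
        if r < acc.2 then (some size, r) else acc)
      ((none : Option (List (String × String))), (10 : Int))).1
  else
    PySem.List.pyGet? sizes 0

-- ===== PRECONDITION & SPEC =====
-- Pre_ excludes the empty list (A raises IndexError) and, for multi-element lists, lists with an
-- element lacking a "type" key: A raises KeyError on most of these and B raises KeyError on all
-- of them (B looks at every element's 'type'), so A's occasional early return there is unmatchable.
def Pre_get_max_size (sizes : List (List (String × String))) : Prop :=
  sizes ≠ [] ∧ (1 < sizes.length → ∀ size ∈ sizes, (PySem.Dict.get? (PySem.Dict.mk size) "type").isSome = true)
instance (sizes : List (List (String × String))) : Decidable (Pre_get_max_size sizes) := by unfold Pre_get_max_size; infer_instance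

def pvWitness_get_max_size : (List (List (String × String))) :=
  [[("type", "x"), ("url", "u1")], [("type", "z"), ("url", "u2")], [("type", "s"), ("url", "u3")]]

def Spec_get_max_size (sizes : List (List (String × String))) (out : Option (List (String × String))) : Prop := out = get_max_size_alt sizes
instance (sizes : List (List (String × String))) (out : Option (List (String × String))) : Decidable (Spec_get_max_size sizes out) := by unfold Spec_get_max_size; infer_instance

-- ===== CLAIM (what is proved, stated in full; the proofs are below) =====
def Claim_equal_get_max_size : Prop := ∀ (sizes : List (List (String × String))), Dom_get_max_size sizes → Pre_get_max_size sizes → Spec_get_max_size sizes (get_max_size sizes)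

-- ===== LEMMAS AND PROOFS =====

-- unfolding Dict.getD on a literal association list, one key at a time
theorem pv_getD_cons (k t : String) (v : Int) (rest : List (String × Int)) (d : Int) :
    PySem.Dict.getD (PySem.Dict.mk ((k, v) :: rest)) t d =
      if t = k then v else PySem.Dict.getD (PySem.Dict.mk rest) t d := by
  simp only [PySem.Dict.getD, PySem.Dict.get?, List.find?]
  by_cases h : t = k
  · subst h; simp
  · have hf : (k == t) = false := beq_eq_false_iff_ne.mpr (Ne.symm h)
    simp [h, hf]

theorem pv_getD_nil (t : String) (d : Int) :
    PySem.Dict.getD (PySem.Dict.mk ([] : List (String × Int))) t d = d := by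
  simp [PySem.Dict.getD, PySem.Dict.get?]

-- the rank of one element of sizes, and one step of B's loop
def pvR (size : List (String × String)) : Int :=
  PySem.Dict.getD rank_get_max_size (PySem.Dict.getD (PySem.Dict.mk size) "type" "") 10

def pvStep (acc : Option (List (String × String)) × Int) (size : List (String × String)) :
    Option (List (String × String)) × Int :=
  if pvR size < acc.2 then (some size, pvR size) else acc

theorem pv_rank_nonneg (t : String) : 0 ≤ PySem.Dict.getD rank_get_max_size t 10 := by
  simp only [rank_get_max_size, pv_getD_cons, pv_getD_nil]
  split_ifs <;> norm_num

-- if no element beats the current bound, B's loop is a no-op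
theorem pv_fold_no_update (xs : List (List (String × String)))
    (b : Option (List (String × String))) (br : Int) (h : ∀ s ∈ xs, ¬ pvR s < br) :
    xs.foldl pvStep (b, br) = (b, br) := by
  induction xs with
  | nil => rfl
  | cons x xs ih =>
    have hx : pvStep (b, br) x = (b, br) := by
      simp [pvStep, h x (by simp)]
    rw [List.foldl_cons, hx]
    exact ih (fun s hs => h s (by simp [hs]))

-- the running bound stays above c if every element's rank does
theorem pv_fold_snd_lt (xs : List (List (String × String)))
    (b : Option (List (String × String))) (br c : Int) (hbr : c < br)
    (h : ∀ s ∈ xs, c < pvR s) : c < (xs.foldl pvStep (b, br)).2 := by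
  induction xs generalizing b br with
  | nil => exact hbr
  | cons x xs ih =>
    rw [List.foldl_cons]
    by_cases hx : pvR x < br
    · rw [show pvStep (b, br) x = (some x, pvR x) from if_pos hx]
      exact ih _ _ (h x (by simp)) (fun s hs => h s (by simp [hs]))
    · rw [show pvStep (b, br) x = (b, br) from if_neg hx]
      exact ih _ _ hbr (fun s hs => h s (by simp [hs]))

-- main bridge: A's scan over the remaining priority suffix ts (starting at rank lo)
-- equals B's single min-tracking pass, provided every element's rank is at least lo
theorem pv_main (ts : List String) (lo : Int) (xs : List (List (String × String)))
    (hlen : lo + ts.length = 10)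
    (hrank : ∀ i : Nat, (hi : i < ts.length) → ∀ t : String,
      (PySem.Dict.getD rank_get_max_size t 10 = lo + i ↔ t = ts[i]))
    (hlo : ∀ s ∈ xs, lo ≤ pvR s) :
    ts.findSome? (fun size_type =>
        xs.find? (fun size => PySem.Dict.getD (PySem.Dict.mk size) "type" "" == size_type))
      = (xs.foldl pvStep ((none : Option (List (String × String))), (10 : Int))).1 := by
  induction ts generalizing lo with
  | nil =>
    have h10 : lo = 10 := by simpa using hlen
    rw [pv_fold_no_update xs none 10 (fun s hs => not_lt.mpr (h10 ▸ hlo s hs))]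
    rfl
  | cons t0 ts ih =>
    have hr0 : ∀ t : String,
        (PySem.Dict.getD rank_get_max_size t 10 = lo ↔ t = t0) := by
      intro t
      simpa using hrank 0 (by simp) t
    rw [List.findSome?_cons]
    cases hfind : xs.find? (fun size => PySem.Dict.getD (PySem.Dict.mk size) "type" "" == t0) with
    | none =>
      have hlo' : ∀ s ∈ xs, lo + 1 ≤ pvR s := by
        intro s hs
        have hne := List.find?_eq_none.mp hfind s hs
        have : PySem.Dict.getD (PySem.Dict.mk s) "type" "" ≠ t0 := by simpa using hne
        have hne2 : pvR s ≠ lo := fun hr => this ((hr0 _).mp hr)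
        have := hlo s hs
        omega
      have hrank' : ∀ i : Nat, (hi : i < ts.length) → ∀ t : String,
          (PySem.Dict.getD rank_get_max_size t 10 = (lo + 1) + i ↔ t = ts[i]) := by
        intro i hi t
        have := hrank (i + 1) (by simpa using Nat.succ_lt_succ hi) t
        simpa [add_assoc, add_comm, add_left_comm] using this
      have := ih (lo + 1) (by simp at hlen ⊢; omega) hrank' hlo'
      simpa using this
    | some m =>
      obtain ⟨hpm, l1, l2, hxs, hl1⟩ := List.find?_eq_some_iff_append.mp hfind
      have htm : PySem.Dict.getD (PySem.Dict.mk m) "type" "" = t0 := by simpa using hpm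
      have hrm : pvR m = lo := (hr0 _).mpr htm
      have hlo1 : ∀ s ∈ l1, lo < pvR s := by
        intro s hs
        have hne : PySem.Dict.getD (PySem.Dict.mk s) "type" "" ≠ t0 := by
          have := hl1 s hs; simpa using this
        have hne2 : pvR s ≠ lo := fun hr => hne ((hr0 _).mp hr)
        have : lo ≤ pvR s := hlo s (by simp [hxs, hs])
        omega
      have hlo2 : ∀ s ∈ l2, lo ≤ pvR s := by
        intro s hs; exact hlo s (by simp [hxs, hs])
      have hlt10 : lo < 10 := by simp at hlen; omega
      subst hxs
      rw [List.foldl_append, List.foldl_cons]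
      have hP2 : lo < (l1.foldl pvStep ((none : Option (List (String × String))), (10 : Int))).2 :=
        pv_fold_snd_lt l1 none 10 lo hlt10 hlo1
      rw [show pvStep (l1.foldl pvStep (none, 10)) m = (some m, lo) by
        simp only [pvStep, hrm]; rw [if_pos hP2]]
      rw [pv_fold_no_update l2 (some m) lo (fun s hs => not_lt.mpr (hlo2 s hs))]

-- the concrete rank table really ranks the concrete priority list
set_option maxHeartbeats 2000000 in
theorem pv_hrank : ∀ i : Nat, (hi : i < (["w", "z", "y", "r", "q", "p", "o", "x", "m", "s"] : List String).length) → ∀ t : String,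
    (PySem.Dict.getD rank_get_max_size t 10 = 0 + i ↔ t = (["w", "z", "y", "r", "q", "p", "o", "x", "m", "s"] : List String)[i]) := by
  intro i hi t
  simp only [List.length_cons, List.length_nil] at hi
  interval_cases i <;>
    simp only [rank_get_max_size, pv_getD_cons, pv_getD_nil, List.getElem_cons_zero,
      List.getElem_cons_succ] <;>
    split_ifs <;> simp_all

-- ===== VERDICT (by name: the statement is the Claim_ definition above) =====
theorem get_max_size_spec : Claim_equal_get_max_size := by
  intro sizes _ _
  unfold Spec_get_max_size get_max_size get_max_size_alt
  by_cases h : 1 < sizes.length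
  · rw [if_pos h, if_pos h]
    have hstep : (fun (acc : Option (List (String × String)) × Int) size =>
        let r := PySem.Dict.getD rank_get_max_size (PySem.Dict.getD (PySem.Dict.mk size) "type" "") 10
        if r < acc.2 then (some size, r) else acc) = pvStep := rfl
    rw [hstep]
    exact pv_main _ 0 sizes (by norm_num) pv_hrank
      (fun s _ => pv_rank_nonneg _)
  · rw [if_neg h, if_neg h]
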